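-- pv_equiv track=rewrite | github.com/jk-jung/problem-solving | codewars/4kyu/4_Mystery Function.py | mystery_inv
-- ===== SOURCE A (Python) =====
-- def mystery_inv(n):
--     k, r = 1, 0
--     while n > 0:
--         if n & 1:
--             r = 2 ** k - r - 1
--         k += 1
--         n //= 2
--     return r
-- ===== SOURCE B (Python) =====
-- def mystery_inv(n):
--     bits = []
--     while n > 0:
--         bits.append(n % 2)
--         n //= 2
--     out, acc = 0, 0
--     for b in reversed(bits):
--         acc ^= b
--         out = 2 * out + acc
--     return out
-- ===== Notes on version B (the rewrite author's own statement) =====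
-- stated objective: alternative
-- what changed: B is a two-stage decode: it first extracts the bit list of n, then rebuilds the result MSB-to-LSB with a running-parity (prefix-XOR) accumulator, instead of A's single loop that conditionally reflects the partial result against a growing power of two.
import Mathlib
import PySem

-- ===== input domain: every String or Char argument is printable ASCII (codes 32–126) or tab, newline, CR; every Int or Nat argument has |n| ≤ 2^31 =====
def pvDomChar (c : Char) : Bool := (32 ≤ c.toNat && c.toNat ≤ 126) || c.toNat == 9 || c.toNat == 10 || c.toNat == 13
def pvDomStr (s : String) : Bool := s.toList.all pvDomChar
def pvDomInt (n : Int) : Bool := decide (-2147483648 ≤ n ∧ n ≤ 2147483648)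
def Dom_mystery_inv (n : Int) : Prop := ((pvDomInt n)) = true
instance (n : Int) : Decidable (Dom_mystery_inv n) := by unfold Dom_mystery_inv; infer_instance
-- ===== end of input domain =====

-- B decodes in two stages (extract the bit list, then an MSB-first prefix-XOR rebuild)
-- instead of A's single loop with a conditional power-of-two reflection (alternative; same cost).

-- termination helper for the loops (cited by name in decreasing_by)
theorem pvFloordivTwoToNatLt (n : Int) (h : 0 < n) : (PySem.Int.floordiv n 2).toNat < n.toNat := by
  rw [PySem.Int.floordiv_eq_ediv_of_pos (by norm_num)]; omega

-- ===== PORT A =====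
-- while-loop of A as structural recursion over the same state (k, r, n);
-- k counts iterations from 1 upward, kept as a Nat so that 2 ** k is Lean's `2 ^ k`.
def mysteryInvGo (k : Nat) (r n : Int) : Int :=
  if h : 0 < n then
    mysteryInvGo (k + 1) (if PySem.Int.band n 1 ≠ 0 then 2 ^ k - r - 1 else r)
      (PySem.Int.floordiv n 2)
  else r
termination_by n.toNat
decreasing_by exact pvFloordivTwoToNatLt n h

def mystery_inv (n : Int) : Int := mysteryInvGo 1 0 n

-- ===== PORT B =====
-- stage 1: bits.append(n % 2); n //= 2   (LSB-first bit list)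
def pvBits (n : Int) : List Int :=
  if h : 0 < n then PySem.Int.mod n 2 :: pvBits (PySem.Int.floordiv n 2) else []
termination_by n.toNat
decreasing_by exact pvFloordivTwoToNatLt n h

-- stage 2: for b in reversed(bits): acc ^= b; out = 2*out + acc
def mystery_inv_alt (n : Int) : Int :=
  ((pvBits n).reverse.foldl
    (fun s b => (2 * s.1 + PySem.Int.bxor s.2 b, PySem.Int.bxor s.2 b)) (0, 0)).1

-- ===== PRECONDITION & SPEC =====
def Spec_mystery_inv (n : Int) (out : Int) : Prop := out = mystery_inv_alt n
instance (n : Int) (out : Int) : Decidable (Spec_mystery_inv n out) := by unfold Spec_mystery_inv; infer_instance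

-- ===== CLAIM (what is proved, stated in full; the proofs are below) =====
def Claim_equal_mystery_inv : Prop := ∀ (n : Int), Dom_mystery_inv n → Spec_mystery_inv n (mystery_inv n)

-- ===== LEMMAS AND PROOFS =====

-- popcount of a natural number
def pvPc : Nat → Nat
  | 0 => 0
  | n + 1 => pvPc ((n + 1) / 2) + (n + 1) % 2
decreasing_by omega

-- Gray decode, defined by the binary recurrence gd n = 2 * gd (n/2) + pc n % 2
def pvGd : Nat → Nat
  | 0 => 0
  | n + 1 => 2 * pvGd ((n + 1) / 2) + pvPc (n + 1) % 2
decreasing_by omega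

theorem pvPc_pos (n : Nat) (h : 0 < n) : pvPc n = pvPc (n / 2) + n % 2 := by
  cases n with
  | zero => omega
  | succ m => rw [pvPc]

theorem pvGd_pos (n : Nat) (h : 0 < n) : pvGd n = 2 * pvGd (n / 2) + pvPc n % 2 := by
  cases n with
  | zero => omega
  | succ m => rw [pvGd]

theorem pvBandOne (N : Nat) : PySem.Int.band (N : Int) 1 = ((N % 2 : Nat) : Int) := by
  have h := PySem.Int.band_natCast N 1
  simpa [Nat.and_one_is_mod] using h

-- closed form of A's loop (the exponent argument is k + 1 ≥ 1)
theorem pvAChar : ∀ N : Nat, ∀ (k : Nat) (r : Int),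
    mysteryInvGo (k + 1) r (N : Int) =
      2 ^ k * (pvGd N : Int) + (if pvPc N % 2 = 1 then 2 ^ k - 1 - r else r) := by
  intro N
  induction N using Nat.strong_induction_on with
  | _ N ih =>
    intro k r
    by_cases hN : 0 < N
    · have hpos : (0 : Int) < (N : Int) := by exact_mod_cast hN
      rw [mysteryInvGo, dif_pos hpos, pvBandOne,
        show PySem.Int.floordiv (N : Int) 2 = ((N / 2 : Nat) : Int) from
          PySem.Int.floordiv_natCast N 2]
      have hstep := ih (N / 2) (by omega)
      have hgd := pvGd_pos N hN
      have hpc := pvPc_pos N hN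
      by_cases hb : N % 2 = 1
      · rw [if_pos (by exact_mod_cast (by omega : ((N % 2 : Nat) : Int) ≠ 0))]
        rw [show k + 1 + 1 = (k + 1) + 1 from rfl, hstep (k + 1) (2 ^ (k + 1) - r - 1)]
        by_cases hp : pvPc (N / 2) % 2 = 1
        · rw [if_pos hp, if_neg (by omega)]
          have : pvGd N = 2 * pvGd (N / 2) := by omega
          rw [this]; push_cast; ring
        · rw [if_neg hp, if_pos (by omega)]
          have : pvGd N = 2 * pvGd (N / 2) + 1 := by omega
          rw [this]; push_cast; ring
      · rw [if_neg (by
          exact_mod_cast (by omega : ¬ ((N % 2 : Nat) : Int) ≠ 0))]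
        rw [show k + 1 + 1 = (k + 1) + 1 from rfl, hstep (k + 1) r]
        by_cases hp : pvPc (N / 2) % 2 = 1
        · rw [if_pos hp, if_pos (by omega)]
          have : pvGd N = 2 * pvGd (N / 2) + 1 := by omega
          rw [this]; push_cast; ring
        · rw [if_neg hp, if_neg (by omega)]
          have : pvGd N = 2 * pvGd (N / 2) := by omega
          rw [this]; push_cast; ring
    · have hz : N = 0 := by omega
      subst hz
      have g0 : pvGd 0 = 0 := by rw [pvGd]
      have p0 : pvPc 0 = 0 := by rw [pvPc]
      rw [mysteryInvGo, dif_neg (by norm_num)]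
      simp [g0, p0]

theorem pvXorMod (x y : Nat) (hx : x < 2) (hy : y < 2) : x ^^^ y = (x + y) % 2 := by
  interval_cases x <;> interval_cases y <;> decide

-- closed form of B's fold: starting from (0,0), processing the (MSB-first) bits of N
-- yields (gray-decoded value, parity of the bits of N)
theorem pvBChar : ∀ N : Nat,
    ((pvBits (N : Int)).reverse.foldl
      (fun s b => (2 * s.1 + PySem.Int.bxor s.2 b, PySem.Int.bxor s.2 b)) (0, 0))
      = (((pvGd N : Nat) : Int), ((pvPc N % 2 : Nat) : Int)) := by
  intro N
  induction N using Nat.strong_induction_on with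
  | _ N ih =>
    by_cases hN : 0 < N
    · have hpos : (0 : Int) < (N : Int) := by exact_mod_cast hN
      rw [pvBits, dif_pos hpos,
        show PySem.Int.mod (N : Int) 2 = ((N % 2 : Nat) : Int) from
          PySem.Int.mod_natCast N 2,
        show PySem.Int.floordiv (N : Int) 2 = ((N / 2 : Nat) : Int) from
          PySem.Int.floordiv_natCast N 2]
      rw [List.reverse_cons, List.foldl_append, ih (N / 2) (by omega)]
      simp only [List.foldl_cons, List.foldl_nil, PySem.Int.bxor_natCast]
      have hx : pvPc (N / 2) % 2 ^^^ N % 2 = pvPc N % 2 := by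
        rw [pvXorMod _ _ (by omega) (by omega), pvPc_pos N hN]; omega
      have hout : 2 * ((pvGd (N / 2) : Nat) : Int) + ((pvPc N % 2 : Nat) : Int)
          = ((pvGd N : Nat) : Int) := by
        rw [pvGd_pos N hN]; push_cast; ring
      rw [hx, hout]
    · have hz : N = 0 := by omega
      subst hz
      have g0 : pvGd 0 = 0 := by rw [pvGd]
      have p0 : pvPc 0 = 0 := by rw [pvPc]
      rw [pvBits, dif_neg (by norm_num)]
      simp [g0, p0]

-- ===== VERDICT (by name: the statement is the Claim_ definition above) =====
theorem mystery_inv_spec : Claim_equal_mystery_inv := by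
  intro n _
  unfold Spec_mystery_inv mystery_inv mystery_inv_alt
  by_cases hn : 0 < n
  · have hN : n = ((n.toNat : Nat) : Int) := by omega
    rw [hN, show (1 : Nat) = 0 + 1 from rfl, pvAChar n.toNat 0 0, pvBChar n.toNat]
    simp
  · rw [mysteryInvGo, dif_neg hn, pvBits, dif_neg hn]
    simp
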